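-- pv_equiv track=rewrite | github.com/jaredxfeng/pycheckio | mountain_scape.py | mountain_scape
-- ===== SOURCE A (Python) =====
-- def mountain_scape(tops):
--     triangles = set()
--     for top_x, top_y in tops:
--         for rows_from_top in range(top_y):
--             row_triangles = {(x, top_y - rows_from_top)
--                 for x in range(top_x - rows_from_top, top_x + rows_from_top + 1)}
--             triangles |= row_triangles
--     return len(triangles)
-- ===== SOURCE B (Python) =====
-- def mountain_scape(tops):
--     # Group each mountain's covered cells as per-row intervals, then merge
--     # intervals row by row and sum the merged lengths (no per-cell set).
--     rows = {}
--     for top_x, top_y in tops: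
--         for r in range(top_y):
--             y = top_y - r
--             rows[y] = rows.get(y, []) + [(top_x - r, top_x + r)]
--     total = 0
--     for ivs in rows.values():
--         cur = None
--         for l, r in sorted(ivs, key=lambda iv: iv[0]):
--             if cur is None:
--                 cur = (l, r)
--             elif l <= cur[1] + 1:
--                 cur = (cur[0], max(cur[1], r))
--             else:
--                 total += cur[1] - cur[0] + 1
--                 cur = (l, r)
--         if cur is not None:
--             total += cur[1] - cur[0] + 1
--     return total
-- ===== Notes on version B (the rewrite author's own statement) =====
-- stated objective: faster
-- what changed: Instead of materialising every covered cell in one big set, B records each mountain row as an interval, groups intervals by row level in a dict, sorts and merges the intervals of each row, and sums the merged lengths.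
import Mathlib
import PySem

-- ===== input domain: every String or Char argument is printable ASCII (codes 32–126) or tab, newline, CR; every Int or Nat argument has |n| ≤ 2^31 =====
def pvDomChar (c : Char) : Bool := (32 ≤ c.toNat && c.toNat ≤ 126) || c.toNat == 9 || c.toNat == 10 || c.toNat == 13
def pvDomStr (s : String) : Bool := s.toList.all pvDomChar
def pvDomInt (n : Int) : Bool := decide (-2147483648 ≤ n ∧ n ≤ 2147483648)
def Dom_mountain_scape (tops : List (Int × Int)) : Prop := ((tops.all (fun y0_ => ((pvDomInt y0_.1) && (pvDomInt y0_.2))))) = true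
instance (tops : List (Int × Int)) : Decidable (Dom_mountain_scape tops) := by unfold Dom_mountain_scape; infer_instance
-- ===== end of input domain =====

-- B replaces A's per-cell set with per-row interval grouping plus sort-merge summation (different algorithm).

-- ===== PORT A =====
def mountain_scape (tops : List (Int × Int)) : Int :=
  let triangles := tops.foldl (fun tri t =>
    (PySem.List.pyRange 0 t.2 1).foldl (fun tri2 r =>
      PySem.Set.union tri2 (PySem.Set.ofList
        ((PySem.List.pyRange (t.1 - r) (t.1 + r + 1) 1).map (fun x => (x, t.2 - r))))) tri)
    PySem.Set.empty
  (triangles.length : Int)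

-- ===== PORT B =====
def mountain_scape_alt (tops : List (Int × Int)) : Int :=
  let rows : PySem.Dict Int (List (Int × Int)) :=
    tops.foldl (fun d t =>
      (PySem.List.pyRange 0 t.2 1).foldl (fun d2 r =>
        d2.insert (t.2 - r) (d2.getD (t.2 - r) [] ++ [(t.1 - r, t.1 + r)])) d)
      PySem.Dict.empty
  rows.values.foldl (fun total ivs =>
    let res := (PySem.List.sorted ivs (fun iv => iv.1) false).foldl
      (fun st iv =>
        match st.2 with
        | none => (st.1, some iv)
        | some c =>
          if iv.1 ≤ c.2 + 1 then (st.1, some (c.1, max c.2 iv.2))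
          else (st.1 + (c.2 - c.1 + 1), some iv))
      ((0 : Int), (none : Option (Int × Int)))
    total + res.1 + (match res.2 with | none => 0 | some c => c.2 - c.1 + 1)) 0

-- ===== PRECONDITION & SPEC =====
def Spec_mountain_scape (tops : List (Int × Int)) (out : Int) : Prop := out = mountain_scape_alt tops
instance (tops : List (Int × Int)) (out : Int) : Decidable (Spec_mountain_scape tops out) := by unfold Spec_mountain_scape; infer_instance

-- ===== CLAIM (what is proved, stated in full; the proofs are below) =====
def Claim_equal_mountain_scape : Prop := ∀ (tops : List (Int × Int)), Dom_mountain_scape tops → Spec_mountain_scape tops (mountain_scape tops)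

-- ===== LEMMAS AND PROOFS =====

-- the flat list of (row level, x-interval) pieces contributed by one mountain / by all of them
def pvRowIntervals (t : Int × Int) : List (Int × (Int × Int)) :=
  (PySem.List.pyRange 0 t.2 1).map (fun r => (t.2 - r, (t.1 - r, t.1 + r)))

def pvAllRows (tops : List (Int × Int)) : List (Int × (Int × Int)) := tops.flatMap pvRowIntervals

-- the x-values covered by a list of intervals, as a Finset
noncomputable def pvIvsFinset (ivs : List (Int × Int)) : Finset Int :=
  ivs.foldr (fun iv a => Finset.Icc iv.1 iv.2 ∪ a) ∅

def pvIvsAt (tops : List (Int × Int)) (y : Int) : List (Int × Int) :=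
  List.map (fun x => x.2) (List.filter (fun q => q.1 == y) (pvAllRows tops))

def pvKeys (tops : List (Int × Int)) : List Int := PySem.Set.ofList ((pvAllRows tops).map (·.1))

-- B's merge loop, named for the proofs (same code as in the port)
def pvStep : Int × Option (Int × Int) → Int × Int → Int × Option (Int × Int)
  | (a, none), iv => (a, some iv)
  | (a, some c), iv =>
      if iv.1 ≤ c.2 + 1 then (a, some (c.1, max c.2 iv.2)) else (a + (c.2 - c.1 + 1), some iv)

def pvFinish : Int × Option (Int × Int) → Int
  | (a, none) => a
  | (a, some c) => a + (c.2 - c.1 + 1)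

def pvMerge (ivs : List (Int × Int)) : Int :=
  pvFinish ((PySem.List.sorted ivs (fun iv => iv.1) false).foldl pvStep (0, none))

-- what it means for a cell to appear in pvAllRows
def pvCovers (tops : List (Int × Int)) (p : Int × Int) : Prop :=
  ∃ q ∈ pvAllRows tops, p.2 = q.1 ∧ q.2.1 ≤ p.1 ∧ p.1 ≤ q.2.2

-- ---------- A side: the set fold ----------

theorem pv_mem_foldl {γ : Type} (F : PySem.Set (Int × Int) → γ → PySem.Set (Int × Int))
    (Q : γ → (Int × Int) → Prop)
    (H : ∀ s x p, p ∈ F s x ↔ p ∈ s ∨ Q x p) :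
    ∀ (l : List γ) (s : PySem.Set (Int × Int)) (p : Int × Int),
      p ∈ l.foldl F s ↔ p ∈ s ∨ ∃ x ∈ l, Q x p := by
  intro l
  induction l with
  | nil => simp
  | cons a l ih =>
    intro s p
    simp only [List.foldl_cons, ih, H, List.mem_cons]
    constructor
    · rintro ((h | h) | ⟨x, hx, hQ⟩)
      · exact Or.inl h
      · exact Or.inr ⟨a, Or.inl rfl, h⟩
      · exact Or.inr ⟨x, Or.inr hx, hQ⟩
    · rintro (h | ⟨x, (rfl | hx), hQ⟩)
      · exact Or.inl (Or.inl h)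
      · exact Or.inl (Or.inr hQ)
      · exact Or.inr ⟨x, hx, hQ⟩

theorem pv_nodup_foldl {γ : Type} (F : PySem.Set (Int × Int) → γ → PySem.Set (Int × Int))
    (H : ∀ s x, List.Nodup s → List.Nodup (F s x)) :
    ∀ (l : List γ) (s : PySem.Set (Int × Int)), List.Nodup s → List.Nodup (l.foldl F s) := by
  intro l
  induction l with
  | nil => intro s hs; simpa using hs
  | cons a l ih => intro s hs; exact ih _ (H s a hs)

theorem pv_memA (tops : List (Int × Int)) (p : Int × Int) :
    p ∈ (tops.foldl (fun tri t =>
      (PySem.List.pyRange 0 t.2 1).foldl (fun tri2 r =>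
        PySem.Set.union tri2 (PySem.Set.ofList
          ((PySem.List.pyRange (t.1 - r) (t.1 + r + 1) 1).map (fun x => (x, t.2 - r))))) tri)
      PySem.Set.empty) ↔ pvCovers tops p := by
  rw [pv_mem_foldl _ (fun t p => ∃ q ∈ pvRowIntervals t, p.2 = q.1 ∧ q.2.1 ≤ p.1 ∧ p.1 ≤ q.2.2)]
  · simp only [pvCovers, pvAllRows, List.mem_flatMap, PySem.Set.empty]
    constructor
    · rintro (h | ⟨t, ht, q, hq, hh⟩)
      · simp at h
      · exact ⟨q, ⟨t, ht, hq⟩, hh⟩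
    · rintro ⟨q, ⟨t, ht, hq⟩, hh⟩
      exact Or.inr ⟨t, ht, q, hq, hh⟩
  · intro s t p'
    rw [pv_mem_foldl _ (fun r p => p.2 = t.2 - r ∧ t.1 - r ≤ p.1 ∧ p.1 ≤ t.1 + r)]
    · constructor
      · rintro (h | ⟨r, hr, h1, h2, h3⟩)
        · exact Or.inl h
        · exact Or.inr ⟨(t.2 - r, (t.1 - r, t.1 + r)),
            List.mem_map.2 ⟨r, hr, rfl⟩, h1, h2, h3⟩
      · rintro (h | ⟨q, hq, h1, h2, h3⟩)
        · exact Or.inl h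
        · rcases List.mem_map.1 hq with ⟨r, hr, rfl⟩
          exact Or.inr ⟨r, hr, h1, h2, h3⟩
    · intro s' r p''
      rw [PySem.Set.mem_union, PySem.Set.mem_ofList]
      simp only [List.mem_map, PySem.List.mem_pyRange_one]
      constructor
      · rintro (h | ⟨x, hx, rfl⟩)
        · exact Or.inl h
        · exact Or.inr ⟨rfl, by omega⟩
      · rintro (h | ⟨h1, h2, h3⟩)
        · exact Or.inl h
        · exact Or.inr ⟨p''.1, by omega, by rw [← h1]⟩

theorem pv_nodupA (tops : List (Int × Int)) :
    List.Nodup (tops.foldl (fun tri t =>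
      (PySem.List.pyRange 0 t.2 1).foldl (fun tri2 r =>
        PySem.Set.union tri2 (PySem.Set.ofList
          ((PySem.List.pyRange (t.1 - r) (t.1 + r + 1) 1).map (fun x => (x, t.2 - r))))) tri)
      PySem.Set.empty) := by
  apply pv_nodup_foldl
  · intro s t hs
    apply pv_nodup_foldl
    · intro s' r hs'
      exact PySem.Set.nodup_union _ _ hs'
    · exact hs
  · simp [PySem.Set.empty]

-- ---------- Finset side ----------

theorem pv_mem_ivsFinset (ivs : List (Int × Int)) (x : Int) :
    x ∈ pvIvsFinset ivs ↔ ∃ iv ∈ ivs, iv.1 ≤ x ∧ x ≤ iv.2 := by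
  induction ivs with
  | nil => simp [pvIvsFinset]
  | cons a l ih =>
    simp only [pvIvsFinset, List.foldr_cons, Finset.mem_union, Finset.mem_Icc, List.mem_cons]
    rw [show l.foldr (fun iv a => Finset.Icc iv.1 iv.2 ∪ a) ∅ = pvIvsFinset l from rfl, ih]
    constructor
    · rintro (h | ⟨iv, hiv, h⟩)
      · exact ⟨a, Or.inl rfl, h⟩
      · exact ⟨iv, Or.inr hiv, h⟩
    · rintro ⟨iv, (rfl | hiv), h⟩
      · exact Or.inl h
      · exact Or.inr ⟨iv, hiv, h⟩

theorem pv_ivsFinset_perm {l l' : List (Int × Int)} (h : l.Perm l') :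
    pvIvsFinset l = pvIvsFinset l' := by
  ext x
  simp only [pv_mem_ivsFinset]
  exact ⟨fun ⟨iv, hiv, hh⟩ => ⟨iv, h.mem_iff.1 hiv, hh⟩,
         fun ⟨iv, hiv, hh⟩ => ⟨iv, h.mem_iff.2 hiv, hh⟩⟩

-- per-level union of images
noncomputable def pvLevels (h : Int → Finset Int) (ys : List Int) : Finset (Int × Int) :=
  ys.foldr (fun y acc => (h y).image (fun x => (x, y)) ∪ acc) ∅

theorem pv_mem_levels (h : Int → Finset Int) (ys : List Int) (p : Int × Int) :
    p ∈ pvLevels h ys ↔ ∃ y ∈ ys, p.2 = y ∧ p.1 ∈ h y := by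
  induction ys with
  | nil => simp [pvLevels]
  | cons a l ih =>
    simp only [pvLevels, List.foldr_cons, Finset.mem_union, Finset.mem_image, List.mem_cons]
    rw [show l.foldr (fun y acc => (h y).image (fun x => (x, y)) ∪ acc) ∅ = pvLevels h l from rfl, ih]
    constructor
    · rintro (⟨x, hx, rfl⟩ | ⟨y, hy, h1, h2⟩)
      · exact ⟨a, Or.inl rfl, rfl, hx⟩
      · exact ⟨y, Or.inr hy, h1, h2⟩
    · rintro ⟨y, (rfl | hy), h1, h2⟩
      · exact Or.inl ⟨p.1, h2, by rw [← h1]⟩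
      · exact Or.inr ⟨y, hy, h1, h2⟩

theorem pv_card_levels (h : Int → Finset Int) (ys : List Int) (hnd : ys.Nodup) :
    ((pvLevels h ys).card : Int) = (ys.map (fun y => ((h y).card : Int))).sum := by
  induction ys with
  | nil => simp [pvLevels]
  | cons a l ih =>
    rcases List.nodup_cons.1 hnd with ⟨ha, hl⟩
    have hdisj : Disjoint ((h a).image (fun x => (x, a))) (pvLevels h l) := by
      rw [Finset.disjoint_left]
      intro p hp hp'
      rcases Finset.mem_image.1 hp with ⟨x, -, hx⟩
      subst hx
      rcases (pv_mem_levels h l (x, a)).1 hp' with ⟨y, hy, h1, -⟩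
      simp only at h1
      exact ha (h1 ▸ hy)
    have hcons : pvLevels h (a :: l) = (h a).image (fun x => (x, a)) ∪ pvLevels h l := rfl
    rw [hcons, Finset.card_union_of_disjoint hdisj,
        Finset.card_image_of_injective _ (fun x y hxy => (Prod.mk.injEq _ _ _ _ ▸ hxy : _ ∧ _).1)]
    push_cast
    rw [List.map_cons, List.sum_cons, ih hl]

-- the whole covered region, level by level
theorem pv_covers_levels (tops : List (Int × Int)) (p : Int × Int) :
    pvCovers tops p ↔ ∃ y ∈ pvKeys tops, p.2 = y ∧ p.1 ∈ pvIvsFinset (pvIvsAt tops y) := by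
  constructor
  · rintro ⟨q, hq, h1, h2, h3⟩
    refine ⟨q.1, ?_, h1, ?_⟩
    · rw [pvKeys, PySem.Set.mem_ofList]
      exact List.mem_map.2 ⟨q, hq, rfl⟩
    · rw [pv_mem_ivsFinset]
      exact ⟨q.2, List.mem_map.2 ⟨q, List.mem_filter.2 ⟨hq, by simp⟩, rfl⟩, h2, h3⟩
  · rintro ⟨y, hy, h1, h2⟩
    rcases (pv_mem_ivsFinset _ _).1 h2 with ⟨iv, hiv, h3, h4⟩
    rcases List.mem_map.1 hiv with ⟨q, hq, rfl⟩
    rcases List.mem_filter.1 hq with ⟨hq', hq2⟩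
    have : q.1 = y := by simpa using hq2
    exact ⟨q, hq', by rw [h1, this], h3, h4⟩

-- ---------- merge loop correctness ----------

theorem pv_step_eq (st : Int × Option (Int × Int)) (iv : Int × Int) :
    (match st.2 with
      | none => (st.1, some iv)
      | some c =>
        if iv.1 ≤ c.2 + 1 then (st.1, some (c.1, max c.2 iv.2))
        else (st.1 + (c.2 - c.1 + 1), some iv)) = pvStep st iv := by
  rcases st with ⟨a, _ | c⟩ <;> rfl

theorem pv_finish_eq (res : Int × Option (Int × Int)) :
    res.1 + (match res.2 with | none => (0:Int) | some c => c.2 - c.1 + 1) = pvFinish res := by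
  rcases res with ⟨a, _ | c⟩ <;> simp [pvFinish]

theorem pv_merge_go (ivs : List (Int × Int)) :
    ∀ (cl cr acc : Int), cl ≤ cr →
      (∀ iv ∈ ivs, cl ≤ iv.1 ∧ iv.1 ≤ iv.2) →
      ivs.Pairwise (fun a b => a.1 ≤ b.1) →
      pvFinish (ivs.foldl pvStep (acc, some (cl, cr))) =
        acc + ((Finset.Icc cl cr ∪ pvIvsFinset ivs).card : Int) := by
  induction ivs with
  | nil =>
    intro cl cr acc hcl _ _
    simp only [List.foldl_nil, pvFinish, pvIvsFinset, List.foldr_nil, Finset.union_empty,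
      Int.card_Icc]
    omega
  | cons a l ih =>
    intro cl cr acc hcl hmem hpw
    have ha := hmem a (List.mem_cons_self ..)
    rcases List.pairwise_cons.1 hpw with ⟨hfst, hpw'⟩
    have hunion : pvIvsFinset (a :: l) = Finset.Icc a.1 a.2 ∪ pvIvsFinset l := rfl
    by_cases hc : a.1 ≤ cr + 1
    · have hstep : pvStep (acc, some (cl, cr)) a = (acc, some (cl, max cr a.2)) := by
        simp [pvStep, hc]
      rw [List.foldl_cons, hstep, ih cl (max cr a.2) acc (le_trans hcl (le_max_left _ _))
          (fun iv hiv => hmem iv (List.mem_cons_of_mem _ hiv)) hpw']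
      have hset : Finset.Icc cl (max cr a.2) = Finset.Icc cl cr ∪ Finset.Icc a.1 a.2 := by
        ext x
        simp only [Finset.mem_union, Finset.mem_Icc, le_max_iff]
        omega
      rw [hunion, ← Finset.union_assoc, ← hset]
    · have hstep : pvStep (acc, some (cl, cr)) a = (acc + (cr - cl + 1), some a) := by
        simp [pvStep, hc]
      rw [List.foldl_cons, hstep, ih a.1 a.2 _ ha.2
          (fun iv hiv => ⟨hfst iv hiv, (hmem iv (List.mem_cons_of_mem _ hiv)).2⟩) hpw']
      have hdisj : Disjoint (Finset.Icc cl cr) (Finset.Icc a.1 a.2 ∪ pvIvsFinset l) := by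
        rw [Finset.disjoint_left]
        intro x hx hx'
        rcases Finset.mem_Icc.1 hx with ⟨-, h2⟩
        rcases Finset.mem_union.1 hx' with h | h
        · rcases Finset.mem_Icc.1 h with ⟨h3, -⟩; omega
        · rcases (pv_mem_ivsFinset l x).1 h with ⟨iv, hiv, h3, -⟩
          have := hfst iv hiv; omega
      rw [hunion, ← Finset.union_assoc]
      rw [show Finset.Icc cl cr ∪ Finset.Icc a.1 a.2 ∪ pvIvsFinset l
            = Finset.Icc cl cr ∪ (Finset.Icc a.1 a.2 ∪ pvIvsFinset l) from Finset.union_assoc ..]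
      rw [Finset.card_union_of_disjoint hdisj]
      push_cast
      rw [Int.card_Icc]
      have h4 : ((cr + 1 - cl).toNat : Int) = cr + 1 - cl := Int.toNat_of_nonneg (by omega)
      rw [h4]
      ring

theorem pv_merge_card (ivs : List (Int × Int)) (hne : ∀ iv ∈ ivs, iv.1 ≤ iv.2) :
    pvMerge ivs = ((pvIvsFinset ivs).card : Int) := by
  unfold pvMerge
  rcases hs : PySem.List.sorted ivs (fun iv => iv.1) false with _ | ⟨a, rest⟩
  · have hnil : ivs = [] := (PySem.List.sorted_eq_nil_iff ..).1 hs
    subst hnil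
    simp [pvFinish, pvIvsFinset]
  · have hperm := PySem.List.sorted_perm ivs (fun iv => iv.1) false
    rw [hs] at hperm
    have hpw := PySem.List.sorted_pairwise ivs (fun iv => iv.1)
    rw [hs] at hpw
    rcases List.pairwise_cons.1 hpw with ⟨hfst, hpw'⟩
    have hmem : ∀ iv ∈ (a :: rest), iv.1 ≤ iv.2 := fun iv hiv => hne iv (hperm.mem_iff.1 hiv)
    have h1 : List.foldl pvStep ((0:Int), (none : Option (Int × Int))) (a :: rest)
        = List.foldl pvStep (0, some a) rest := by
      simp [pvStep]
    rw [h1, pv_merge_go rest a.1 a.2 0 (hmem a (List.mem_cons_self ..))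
        (fun iv hiv => ⟨hfst iv hiv, hmem iv (List.mem_cons_of_mem _ hiv)⟩) hpw']
    rw [show Finset.Icc a.1 a.2 ∪ pvIvsFinset rest = pvIvsFinset (a :: rest) from rfl,
        pv_ivsFinset_perm hperm]
    ring

-- ---------- B side: the dict fold ----------

theorem pv_rows_eq (tops : List (Int × Int)) :
    tops.foldl (fun d t =>
      (PySem.List.pyRange 0 t.2 1).foldl (fun d2 r =>
        d2.insert (t.2 - r) (d2.getD (t.2 - r) [] ++ [(t.1 - r, t.1 + r)])) d)
      PySem.Dict.empty
    = (pvAllRows tops).foldl (fun d p => d.modify p.1 [] (fun v => v ++ [p.2])) PySem.Dict.empty := by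
  rw [pvAllRows, List.foldl_flatMap]
  apply PySem.List.foldl_congr_mem
  intro d t _
  rw [pvRowIntervals, List.foldl_map]
  rfl

theorem pv_keys_rows (tops : List (Int × Int)) :
    ((pvAllRows tops).foldl (fun d p => d.modify p.1 [] (fun v => v ++ [p.2]))
      (PySem.Dict.empty : PySem.Dict Int (List (Int × Int)))).keys = pvKeys tops := by
  rw [show (fun (d : PySem.Dict Int (List (Int × Int))) (p : Int × (Int × Int)) =>
        d.modify p.1 [] (fun v => v ++ [p.2]))
      = (fun d p => d.modify (p.1) []
          ((fun (d : PySem.Dict Int (List (Int × Int))) (p : Int × (Int × Int)) =>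
            (fun v => v ++ [p.2])) d p)) from rfl]
  rw [PySem.Dict.keys_foldl_modify_key]
  simp [pvKeys, PySem.Set.update_nil_left]

theorem pv_nodup_keys_rows (tops : List (Int × Int)) :
    ((pvAllRows tops).foldl (fun d p => d.modify p.1 [] (fun v => v ++ [p.2]))
      (PySem.Dict.empty : PySem.Dict Int (List (Int × Int)))).keys.Nodup := by
  rw [pv_keys_rows]
  exact PySem.Set.nodup_ofList _

theorem pv_getD_rows (tops : List (Int × Int)) (y : Int) :
    ((pvAllRows tops).foldl (fun d p => d.modify p.1 [] (fun v => v ++ [p.2]))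
      (PySem.Dict.empty : PySem.Dict Int (List (Int × Int)))).getD y [] = pvIvsAt tops y := by
  rw [PySem.Dict.getD_foldl_modify_append]
  simp [pvIvsAt]

theorem pv_fold_values (tops : List (Int × Int)) (D : PySem.Dict Int (List (Int × Int)))
    (hnd : D.keys.Nodup) (hg : ∀ y, D.getD y [] = pvIvsAt tops y) (hk : D.keys = pvKeys tops) :
    D.values.foldl (fun total ivs =>
      let res := (PySem.List.sorted ivs (fun iv => iv.1) false).foldl
        (fun st iv =>
          match st.2 with
          | none => (st.1, some iv)
          | some c =>
            if iv.1 ≤ c.2 + 1 then (st.1, some (c.1, max c.2 iv.2))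
            else (st.1 + (c.2 - c.1 + 1), some iv))
        ((0 : Int), (none : Option (Int × Int)))
      total + res.1 + (match res.2 with | none => 0 | some c => c.2 - c.1 + 1)) 0
    = ((pvKeys tops).map (fun y => pvMerge (pvIvsAt tops y))).sum := by
  have hv : D.values = D.keys.map (fun k => D.getD k []) := by
    rw [show D.values = D.items.map (fun p => p.2) from rfl,
        PySem.Dict.items_eq_map_keys D hnd [], List.map_map]
    rfl
  rw [hv, List.foldl_map]
  have hcongr := PySem.List.foldl_congr_mem (l := D.keys) (init := (0 : Int))
    (f := fun (total k : Int) =>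
      let res := (PySem.List.sorted (D.getD k []) (fun iv => iv.1) false).foldl
        (fun st iv =>
          match st.2 with
          | none => (st.1, some iv)
          | some c =>
            if iv.1 ≤ c.2 + 1 then (st.1, some (c.1, max c.2 iv.2))
            else (st.1 + (c.2 - c.1 + 1), some iv))
        ((0 : Int), (none : Option (Int × Int)))
      total + res.1 + (match res.2 with | none => 0 | some c => c.2 - c.1 + 1))
    (g := fun (total k : Int) => total + pvMerge (pvIvsAt tops k))
    (by
      intro acc k _
      show acc + _ + _ = _
      rw [show ((fun (st : Int × Option (Int × Int)) (iv : Int × Int) =>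
          match st.2 with
          | none => (st.1, some iv)
          | some c =>
            if iv.1 ≤ c.2 + 1 then (st.1, some (c.1, max c.2 iv.2))
            else (st.1 + (c.2 - c.1 + 1), some iv))) = pvStep from
          funext (fun st => funext (fun iv => pv_step_eq st iv))]
      rw [add_assoc, pv_finish_eq, hg]
      rfl)
  rw [hcongr]
  rw [PySem.List.foldl_add _ (fun k => pvMerge (pvIvsAt tops k)) 0, hk]
  simp

theorem pv_alt_eq (tops : List (Int × Int)) :
    mountain_scape_alt tops = ((pvKeys tops).map (fun y => pvMerge (pvIvsAt tops y))).sum := by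
  unfold mountain_scape_alt
  rw [pv_rows_eq]
  exact pv_fold_values tops _ (pv_nodup_keys_rows tops) (pv_getD_rows tops) (pv_keys_rows tops)

-- ---------- assembly ----------

theorem pv_allRows_nonempty (tops : List (Int × Int)) (q : Int × (Int × Int))
    (hq : q ∈ pvAllRows tops) : q.2.1 ≤ q.2.2 := by
  rcases List.mem_flatMap.1 hq with ⟨t, -, hq'⟩
  rcases List.mem_map.1 hq' with ⟨r, hr, rfl⟩
  have := (PySem.List.mem_pyRange_one.1 hr).1
  simp only
  omega

theorem pv_ivsAt_nonempty (tops : List (Int × Int)) (y : Int) :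
    ∀ iv ∈ pvIvsAt tops y, iv.1 ≤ iv.2 := by
  intro iv hiv
  rcases List.mem_map.1 hiv with ⟨q, hq, rfl⟩
  exact pv_allRows_nonempty tops q (List.mem_filter.1 hq).1

-- ===== VERDICT (by name: the statement is the Claim_ definition above) =====
theorem mountain_scape_spec : Claim_equal_mountain_scape := by
  intro tops _
  unfold Spec_mountain_scape
  rw [pv_alt_eq]
  have hA : mountain_scape tops = (((tops.foldl (fun tri t =>
      (PySem.List.pyRange 0 t.2 1).foldl (fun tri2 r =>
        PySem.Set.union tri2 (PySem.Set.ofList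
          ((PySem.List.pyRange (t.1 - r) (t.1 + r + 1) 1).map (fun x => (x, t.2 - r))))) tri)
      PySem.Set.empty).length : Int)) := rfl
  rw [hA]
  set S := tops.foldl (fun tri t =>
      (PySem.List.pyRange 0 t.2 1).foldl (fun tri2 r =>
        PySem.Set.union tri2 (PySem.Set.ofList
          ((PySem.List.pyRange (t.1 - r) (t.1 + r + 1) 1).map (fun x => (x, t.2 - r))))) tri)
      PySem.Set.empty with hS
  have hfin : S.toFinset = pvLevels (fun y => pvIvsFinset (pvIvsAt tops y)) (pvKeys tops) := by
    ext p
    rw [List.mem_toFinset, hS, pv_memA, pv_mem_levels]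
    exact pv_covers_levels tops p
  have hlen : (S.length : Int) = (S.toFinset.card : Int) := by
    rw [List.toFinset_card_of_nodup (hS ▸ pv_nodupA tops)]
  rw [hlen, hfin, pv_card_levels _ (pvKeys tops) (by rw [pvKeys]; exact PySem.Set.nodup_ofList _)]
  exact congrArg List.sum (List.map_congr_left (fun y _ =>
    (pv_merge_card (pvIvsAt tops y) (pv_ivsAt_nonempty tops y)).symm))
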